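-- pv_equiv track=rewrite | github.com/vs-uulm/libsig_pets | libsig/primes.py | _prime_check_count
-- ===== SOURCE A (Python) =====
-- def _prime_check_count(bit_count):
--     """
--     from openssl https://github.com/openssl/openssl/blob/6f0ac0e2f27d9240516edb9a23b7863e7ad02898/include/openssl/bn.h#L121
--     :param bit_count:
--     :return:
--     """
--     checks = {
--         1300: 2,
--         850: 3,
--         650: 4,
--         550: 5,
--         450: 6,
--         400: 7,
--         350: 8,
--         300: 9,
--         250: 12,
--         200: 15,
--         150: 18,
--         100: 27
--     }
--     for size, count in checks.items():
--         if bit_count >= size: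
--             return count
-- ===== SOURCE B (Python) =====
-- _BOUNDS = [100, 150, 200, 250, 300, 350, 400, 450, 550, 650, 850, 1300]
-- _COUNTS = [27, 18, 15, 12, 9, 8, 7, 6, 5, 4, 3, 2]
--
--
-- def _prime_check_count(bit_count):
--     # binary search: index of first boundary > bit_count (bisect_right)
--     lo, hi = 0, len(_BOUNDS)
--     while lo < hi:
--         mid = (lo + hi) // 2
--         if bit_count < _BOUNDS[mid]:
--             hi = mid
--         else:
--             lo = mid + 1
--     if lo == 0:
--         return None
--     return _COUNTS[lo - 1]
-- ===== Notes on version B (the rewrite author's own statement) =====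
-- stated objective: idiomatic
-- what changed: Replaced the linear descending scan over a dict with a binary search (bisect_right) over an ascending boundary table paired with a count table.
import Mathlib
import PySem

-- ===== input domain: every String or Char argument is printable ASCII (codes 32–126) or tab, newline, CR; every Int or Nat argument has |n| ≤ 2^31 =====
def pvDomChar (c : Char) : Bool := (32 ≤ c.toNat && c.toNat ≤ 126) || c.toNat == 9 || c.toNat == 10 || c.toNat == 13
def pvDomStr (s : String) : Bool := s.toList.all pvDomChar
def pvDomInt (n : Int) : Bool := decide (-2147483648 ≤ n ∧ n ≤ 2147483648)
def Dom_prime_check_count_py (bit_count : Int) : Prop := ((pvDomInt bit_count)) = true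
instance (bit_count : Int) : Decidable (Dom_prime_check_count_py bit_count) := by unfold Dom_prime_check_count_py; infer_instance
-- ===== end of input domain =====

-- B replaces A's linear descending scan with a binary search over an ascending boundary table (idiomatic table lookup).

-- ===== PORT A =====
-- A's dict literal in insertion order; the loop scans its items first to last.
def pvChecksA : List (Int × Int) :=
  [(1300, 2), (850, 3), (650, 4), (550, 5), (450, 6), (400, 7),
   (350, 8), (300, 9), (250, 12), (200, 15), (150, 18), (100, 27)]

-- 'for size, count in checks.items(): if bit_count >= size: return count'
def pvScanA (bit_count : Int) : List (Int × Int) → Option Int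
  | [] => none
  | (size, count) :: rest => if bit_count ≥ size then some count else pvScanA bit_count rest

def prime_check_count_py (bit_count : Int) : Option Int :=
  pvScanA bit_count pvChecksA

-- ===== PORT B =====
def pvBoundsB : List Int := [100, 150, 200, 250, 300, 350, 400, 450, 550, 650, 850, 1300]
def pvCountsB : List Int := [27, 18, 15, 12, 9, 8, 7, 6, 5, 4, 3, 2]

-- the hand-written bisect_right loop of Source B ('while lo < hi: …'); the structural fuel
-- len(_BOUNDS) bounds the iteration count exactly: hi - lo ≤ fuel holds initially and
-- shrinks by at least 1 per iteration, so the 0-fuel arm is never the loop's exit on a real run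
def pvBisectB (bit_count : Int) : Nat → Nat → Nat → Nat
  | 0, lo, _ => lo
  | f + 1, lo, hi =>
    if lo < hi then
      let mid := (lo + hi) / 2
      if bit_count < pvBoundsB.getD mid 0 then pvBisectB bit_count f lo mid
      else pvBisectB bit_count f (mid + 1) hi
    else lo

def prime_check_count_py_alt (bit_count : Int) : Option Int :=
  let lo := pvBisectB bit_count pvBoundsB.length 0 pvBoundsB.length
  if lo = 0 then none else some (pvCountsB.getD (lo - 1) 0)

-- ===== PRECONDITION & SPEC =====
def Spec_prime_check_count_py (bit_count : Int) (out : Option Int) : Prop := out = prime_check_count_py_alt bit_count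
instance (bit_count : Int) (out : Option Int) : Decidable (Spec_prime_check_count_py bit_count out) := by unfold Spec_prime_check_count_py; infer_instance

-- ===== CLAIM (what is proved, stated in full; the proofs are below) =====
def Claim_equal_prime_check_count_py : Prop := ∀ (bit_count : Int), Dom_prime_check_count_py bit_count → Spec_prime_check_count_py bit_count (prime_check_count_py bit_count)

-- ===== LEMMAS AND PROOFS =====

-- ===== VERDICT (by name: the statement is the Claim_ definition above) =====
theorem prime_check_count_py_spec : Claim_equal_prime_check_count_py := by
  intro b _
  unfold Spec_prime_check_count_py
  simp only [prime_check_count_py, prime_check_count_py_alt, pvChecksA, pvScanA]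
  rw [show pvBoundsB.length = 12 from rfl]
  by_cases h0 : b < 100
  · rw [if_neg (show ¬ b ≥ (1300:Int) by omega)]
    rw [if_neg (show ¬ b ≥ (850:Int) by omega)]
    rw [if_neg (show ¬ b ≥ (650:Int) by omega)]
    rw [if_neg (show ¬ b ≥ (550:Int) by omega)]
    rw [if_neg (show ¬ b ≥ (450:Int) by omega)]
    rw [if_neg (show ¬ b ≥ (400:Int) by omega)]
    rw [if_neg (show ¬ b ≥ (350:Int) by omega)]
    rw [if_neg (show ¬ b ≥ (300:Int) by omega)]
    rw [if_neg (show ¬ b ≥ (250:Int) by omega)]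
    rw [if_neg (show ¬ b ≥ (200:Int) by omega)]
    rw [if_neg (show ¬ b ≥ (150:Int) by omega)]
    rw [if_neg (show ¬ b ≥ (100:Int) by omega)]
    rw [show pvBisectB b 12 0 12 = (if b < (400:Int) then pvBisectB b 11 0 6 else pvBisectB b 11 7 12) from rfl]
    rw [if_pos (show b < (400:Int) by omega)]
    rw [show pvBisectB b 11 0 6 = (if b < (250:Int) then pvBisectB b 10 0 3 else pvBisectB b 10 4 6) from rfl]
    rw [if_pos (show b < (250:Int) by omega)]
    rw [show pvBisectB b 10 0 3 = (if b < (150:Int) then pvBisectB b 9 0 1 else pvBisectB b 9 2 3) from rfl]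
    rw [if_pos (show b < (150:Int) by omega)]
    rw [show pvBisectB b 9 0 1 = (if b < (100:Int) then pvBisectB b 8 0 0 else pvBisectB b 8 1 1) from rfl]
    rw [if_pos (show b < (100:Int) by omega)]
    rw [show pvBisectB b 8 0 0 = 0 from rfl]
    rfl
  · -- b ≥ 100
    by_cases h1 : b < 150
    · rw [if_neg (show ¬ b ≥ (1300:Int) by omega)]
      rw [if_neg (show ¬ b ≥ (850:Int) by omega)]
      rw [if_neg (show ¬ b ≥ (650:Int) by omega)]
      rw [if_neg (show ¬ b ≥ (550:Int) by omega)]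
      rw [if_neg (show ¬ b ≥ (450:Int) by omega)]
      rw [if_neg (show ¬ b ≥ (400:Int) by omega)]
      rw [if_neg (show ¬ b ≥ (350:Int) by omega)]
      rw [if_neg (show ¬ b ≥ (300:Int) by omega)]
      rw [if_neg (show ¬ b ≥ (250:Int) by omega)]
      rw [if_neg (show ¬ b ≥ (200:Int) by omega)]
      rw [if_neg (show ¬ b ≥ (150:Int) by omega)]
      rw [if_pos (show b ≥ (100:Int) by omega)]
      rw [show pvBisectB b 12 0 12 = (if b < (400:Int) then pvBisectB b 11 0 6 else pvBisectB b 11 7 12) from rfl]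
      rw [if_pos (show b < (400:Int) by omega)]
      rw [show pvBisectB b 11 0 6 = (if b < (250:Int) then pvBisectB b 10 0 3 else pvBisectB b 10 4 6) from rfl]
      rw [if_pos (show b < (250:Int) by omega)]
      rw [show pvBisectB b 10 0 3 = (if b < (150:Int) then pvBisectB b 9 0 1 else pvBisectB b 9 2 3) from rfl]
      rw [if_pos (show b < (150:Int) by omega)]
      rw [show pvBisectB b 9 0 1 = (if b < (100:Int) then pvBisectB b 8 0 0 else pvBisectB b 8 1 1) from rfl]
      rw [if_neg (show ¬ b < (100:Int) by omega)]
      rw [show pvBisectB b 8 1 1 = 1 from rfl]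
      rfl
    · -- b ≥ 150
      by_cases h2 : b < 200
      · rw [if_neg (show ¬ b ≥ (1300:Int) by omega)]
        rw [if_neg (show ¬ b ≥ (850:Int) by omega)]
        rw [if_neg (show ¬ b ≥ (650:Int) by omega)]
        rw [if_neg (show ¬ b ≥ (550:Int) by omega)]
        rw [if_neg (show ¬ b ≥ (450:Int) by omega)]
        rw [if_neg (show ¬ b ≥ (400:Int) by omega)]
        rw [if_neg (show ¬ b ≥ (350:Int) by omega)]
        rw [if_neg (show ¬ b ≥ (300:Int) by omega)]
        rw [if_neg (show ¬ b ≥ (250:Int) by omega)]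
        rw [if_neg (show ¬ b ≥ (200:Int) by omega)]
        rw [if_pos (show b ≥ (150:Int) by omega)]
        rw [show pvBisectB b 12 0 12 = (if b < (400:Int) then pvBisectB b 11 0 6 else pvBisectB b 11 7 12) from rfl]
        rw [if_pos (show b < (400:Int) by omega)]
        rw [show pvBisectB b 11 0 6 = (if b < (250:Int) then pvBisectB b 10 0 3 else pvBisectB b 10 4 6) from rfl]
        rw [if_pos (show b < (250:Int) by omega)]
        rw [show pvBisectB b 10 0 3 = (if b < (150:Int) then pvBisectB b 9 0 1 else pvBisectB b 9 2 3) from rfl]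
        rw [if_neg (show ¬ b < (150:Int) by omega)]
        rw [show pvBisectB b 9 2 3 = (if b < (200:Int) then pvBisectB b 8 2 2 else pvBisectB b 8 3 3) from rfl]
        rw [if_pos (show b < (200:Int) by omega)]
        rw [show pvBisectB b 8 2 2 = 2 from rfl]
        rfl
      · -- b ≥ 200
        by_cases h3 : b < 250
        · rw [if_neg (show ¬ b ≥ (1300:Int) by omega)]
          rw [if_neg (show ¬ b ≥ (850:Int) by omega)]
          rw [if_neg (show ¬ b ≥ (650:Int) by omega)]
          rw [if_neg (show ¬ b ≥ (550:Int) by omega)]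
          rw [if_neg (show ¬ b ≥ (450:Int) by omega)]
          rw [if_neg (show ¬ b ≥ (400:Int) by omega)]
          rw [if_neg (show ¬ b ≥ (350:Int) by omega)]
          rw [if_neg (show ¬ b ≥ (300:Int) by omega)]
          rw [if_neg (show ¬ b ≥ (250:Int) by omega)]
          rw [if_pos (show b ≥ (200:Int) by omega)]
          rw [show pvBisectB b 12 0 12 = (if b < (400:Int) then pvBisectB b 11 0 6 else pvBisectB b 11 7 12) from rfl]
          rw [if_pos (show b < (400:Int) by omega)]
          rw [show pvBisectB b 11 0 6 = (if b < (250:Int) then pvBisectB b 10 0 3 else pvBisectB b 10 4 6) from rfl]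
          rw [if_pos (show b < (250:Int) by omega)]
          rw [show pvBisectB b 10 0 3 = (if b < (150:Int) then pvBisectB b 9 0 1 else pvBisectB b 9 2 3) from rfl]
          rw [if_neg (show ¬ b < (150:Int) by omega)]
          rw [show pvBisectB b 9 2 3 = (if b < (200:Int) then pvBisectB b 8 2 2 else pvBisectB b 8 3 3) from rfl]
          rw [if_neg (show ¬ b < (200:Int) by omega)]
          rw [show pvBisectB b 8 3 3 = 3 from rfl]
          rfl
        · -- b ≥ 250
          by_cases h4 : b < 300
          · rw [if_neg (show ¬ b ≥ (1300:Int) by omega)]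
            rw [if_neg (show ¬ b ≥ (850:Int) by omega)]
            rw [if_neg (show ¬ b ≥ (650:Int) by omega)]
            rw [if_neg (show ¬ b ≥ (550:Int) by omega)]
            rw [if_neg (show ¬ b ≥ (450:Int) by omega)]
            rw [if_neg (show ¬ b ≥ (400:Int) by omega)]
            rw [if_neg (show ¬ b ≥ (350:Int) by omega)]
            rw [if_neg (show ¬ b ≥ (300:Int) by omega)]
            rw [if_pos (show b ≥ (250:Int) by omega)]
            rw [show pvBisectB b 12 0 12 = (if b < (400:Int) then pvBisectB b 11 0 6 else pvBisectB b 11 7 12) from rfl]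
            rw [if_pos (show b < (400:Int) by omega)]
            rw [show pvBisectB b 11 0 6 = (if b < (250:Int) then pvBisectB b 10 0 3 else pvBisectB b 10 4 6) from rfl]
            rw [if_neg (show ¬ b < (250:Int) by omega)]
            rw [show pvBisectB b 10 4 6 = (if b < (350:Int) then pvBisectB b 9 4 5 else pvBisectB b 9 6 6) from rfl]
            rw [if_pos (show b < (350:Int) by omega)]
            rw [show pvBisectB b 9 4 5 = (if b < (300:Int) then pvBisectB b 8 4 4 else pvBisectB b 8 5 5) from rfl]
            rw [if_pos (show b < (300:Int) by omega)]
            rw [show pvBisectB b 8 4 4 = 4 from rfl]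
            rfl
          · -- b ≥ 300
            by_cases h5 : b < 350
            · rw [if_neg (show ¬ b ≥ (1300:Int) by omega)]
              rw [if_neg (show ¬ b ≥ (850:Int) by omega)]
              rw [if_neg (show ¬ b ≥ (650:Int) by omega)]
              rw [if_neg (show ¬ b ≥ (550:Int) by omega)]
              rw [if_neg (show ¬ b ≥ (450:Int) by omega)]
              rw [if_neg (show ¬ b ≥ (400:Int) by omega)]
              rw [if_neg (show ¬ b ≥ (350:Int) by omega)]
              rw [if_pos (show b ≥ (300:Int) by omega)]
              rw [show pvBisectB b 12 0 12 = (if b < (400:Int) then pvBisectB b 11 0 6 else pvBisectB b 11 7 12) from rfl]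
              rw [if_pos (show b < (400:Int) by omega)]
              rw [show pvBisectB b 11 0 6 = (if b < (250:Int) then pvBisectB b 10 0 3 else pvBisectB b 10 4 6) from rfl]
              rw [if_neg (show ¬ b < (250:Int) by omega)]
              rw [show pvBisectB b 10 4 6 = (if b < (350:Int) then pvBisectB b 9 4 5 else pvBisectB b 9 6 6) from rfl]
              rw [if_pos (show b < (350:Int) by omega)]
              rw [show pvBisectB b 9 4 5 = (if b < (300:Int) then pvBisectB b 8 4 4 else pvBisectB b 8 5 5) from rfl]
              rw [if_neg (show ¬ b < (300:Int) by omega)]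
              rw [show pvBisectB b 8 5 5 = 5 from rfl]
              rfl
            · -- b ≥ 350
              by_cases h6 : b < 400
              · rw [if_neg (show ¬ b ≥ (1300:Int) by omega)]
                rw [if_neg (show ¬ b ≥ (850:Int) by omega)]
                rw [if_neg (show ¬ b ≥ (650:Int) by omega)]
                rw [if_neg (show ¬ b ≥ (550:Int) by omega)]
                rw [if_neg (show ¬ b ≥ (450:Int) by omega)]
                rw [if_neg (show ¬ b ≥ (400:Int) by omega)]
                rw [if_pos (show b ≥ (350:Int) by omega)]
                rw [show pvBisectB b 12 0 12 = (if b < (400:Int) then pvBisectB b 11 0 6 else pvBisectB b 11 7 12) from rfl]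
                rw [if_pos (show b < (400:Int) by omega)]
                rw [show pvBisectB b 11 0 6 = (if b < (250:Int) then pvBisectB b 10 0 3 else pvBisectB b 10 4 6) from rfl]
                rw [if_neg (show ¬ b < (250:Int) by omega)]
                rw [show pvBisectB b 10 4 6 = (if b < (350:Int) then pvBisectB b 9 4 5 else pvBisectB b 9 6 6) from rfl]
                rw [if_neg (show ¬ b < (350:Int) by omega)]
                rw [show pvBisectB b 9 6 6 = 6 from rfl]
                rfl
              · -- b ≥ 400
                by_cases h7 : b < 450
                · rw [if_neg (show ¬ b ≥ (1300:Int) by omega)]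
                  rw [if_neg (show ¬ b ≥ (850:Int) by omega)]
                  rw [if_neg (show ¬ b ≥ (650:Int) by omega)]
                  rw [if_neg (show ¬ b ≥ (550:Int) by omega)]
                  rw [if_neg (show ¬ b ≥ (450:Int) by omega)]
                  rw [if_pos (show b ≥ (400:Int) by omega)]
                  rw [show pvBisectB b 12 0 12 = (if b < (400:Int) then pvBisectB b 11 0 6 else pvBisectB b 11 7 12) from rfl]
                  rw [if_neg (show ¬ b < (400:Int) by omega)]
                  rw [show pvBisectB b 11 7 12 = (if b < (650:Int) then pvBisectB b 10 7 9 else pvBisectB b 10 10 12) from rfl]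
                  rw [if_pos (show b < (650:Int) by omega)]
                  rw [show pvBisectB b 10 7 9 = (if b < (550:Int) then pvBisectB b 9 7 8 else pvBisectB b 9 9 9) from rfl]
                  rw [if_pos (show b < (550:Int) by omega)]
                  rw [show pvBisectB b 9 7 8 = (if b < (450:Int) then pvBisectB b 8 7 7 else pvBisectB b 8 8 8) from rfl]
                  rw [if_pos (show b < (450:Int) by omega)]
                  rw [show pvBisectB b 8 7 7 = 7 from rfl]
                  rfl
                · -- b ≥ 450
                  by_cases h8 : b < 550
                  · rw [if_neg (show ¬ b ≥ (1300:Int) by omega)]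
                    rw [if_neg (show ¬ b ≥ (850:Int) by omega)]
                    rw [if_neg (show ¬ b ≥ (650:Int) by omega)]
                    rw [if_neg (show ¬ b ≥ (550:Int) by omega)]
                    rw [if_pos (show b ≥ (450:Int) by omega)]
                    rw [show pvBisectB b 12 0 12 = (if b < (400:Int) then pvBisectB b 11 0 6 else pvBisectB b 11 7 12) from rfl]
                    rw [if_neg (show ¬ b < (400:Int) by omega)]
                    rw [show pvBisectB b 11 7 12 = (if b < (650:Int) then pvBisectB b 10 7 9 else pvBisectB b 10 10 12) from rfl]
                    rw [if_pos (show b < (650:Int) by omega)]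
                    rw [show pvBisectB b 10 7 9 = (if b < (550:Int) then pvBisectB b 9 7 8 else pvBisectB b 9 9 9) from rfl]
                    rw [if_pos (show b < (550:Int) by omega)]
                    rw [show pvBisectB b 9 7 8 = (if b < (450:Int) then pvBisectB b 8 7 7 else pvBisectB b 8 8 8) from rfl]
                    rw [if_neg (show ¬ b < (450:Int) by omega)]
                    rw [show pvBisectB b 8 8 8 = 8 from rfl]
                    rfl
                  · -- b ≥ 550
                    by_cases h9 : b < 650
                    · rw [if_neg (show ¬ b ≥ (1300:Int) by omega)]
                      rw [if_neg (show ¬ b ≥ (850:Int) by omega)]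
                      rw [if_neg (show ¬ b ≥ (650:Int) by omega)]
                      rw [if_pos (show b ≥ (550:Int) by omega)]
                      rw [show pvBisectB b 12 0 12 = (if b < (400:Int) then pvBisectB b 11 0 6 else pvBisectB b 11 7 12) from rfl]
                      rw [if_neg (show ¬ b < (400:Int) by omega)]
                      rw [show pvBisectB b 11 7 12 = (if b < (650:Int) then pvBisectB b 10 7 9 else pvBisectB b 10 10 12) from rfl]
                      rw [if_pos (show b < (650:Int) by omega)]
                      rw [show pvBisectB b 10 7 9 = (if b < (550:Int) then pvBisectB b 9 7 8 else pvBisectB b 9 9 9) from rfl]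
                      rw [if_neg (show ¬ b < (550:Int) by omega)]
                      rw [show pvBisectB b 9 9 9 = 9 from rfl]
                      rfl
                    · -- b ≥ 650
                      by_cases h10 : b < 850
                      · rw [if_neg (show ¬ b ≥ (1300:Int) by omega)]
                        rw [if_neg (show ¬ b ≥ (850:Int) by omega)]
                        rw [if_pos (show b ≥ (650:Int) by omega)]
                        rw [show pvBisectB b 12 0 12 = (if b < (400:Int) then pvBisectB b 11 0 6 else pvBisectB b 11 7 12) from rfl]
                        rw [if_neg (show ¬ b < (400:Int) by omega)]
                        rw [show pvBisectB b 11 7 12 = (if b < (650:Int) then pvBisectB b 10 7 9 else pvBisectB b 10 10 12) from rfl]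
                        rw [if_neg (show ¬ b < (650:Int) by omega)]
                        rw [show pvBisectB b 10 10 12 = (if b < (1300:Int) then pvBisectB b 9 10 11 else pvBisectB b 9 12 12) from rfl]
                        rw [if_pos (show b < (1300:Int) by omega)]
                        rw [show pvBisectB b 9 10 11 = (if b < (850:Int) then pvBisectB b 8 10 10 else pvBisectB b 8 11 11) from rfl]
                        rw [if_pos (show b < (850:Int) by omega)]
                        rw [show pvBisectB b 8 10 10 = 10 from rfl]
                        rfl
                      · -- b ≥ 850
                        by_cases h11 : b < 1300
                        · rw [if_neg (show ¬ b ≥ (1300:Int) by omega)]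
                          rw [if_pos (show b ≥ (850:Int) by omega)]
                          rw [show pvBisectB b 12 0 12 = (if b < (400:Int) then pvBisectB b 11 0 6 else pvBisectB b 11 7 12) from rfl]
                          rw [if_neg (show ¬ b < (400:Int) by omega)]
                          rw [show pvBisectB b 11 7 12 = (if b < (650:Int) then pvBisectB b 10 7 9 else pvBisectB b 10 10 12) from rfl]
                          rw [if_neg (show ¬ b < (650:Int) by omega)]
                          rw [show pvBisectB b 10 10 12 = (if b < (1300:Int) then pvBisectB b 9 10 11 else pvBisectB b 9 12 12) from rfl]
                          rw [if_pos (show b < (1300:Int) by omega)]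
                          rw [show pvBisectB b 9 10 11 = (if b < (850:Int) then pvBisectB b 8 10 10 else pvBisectB b 8 11 11) from rfl]
                          rw [if_neg (show ¬ b < (850:Int) by omega)]
                          rw [show pvBisectB b 8 11 11 = 11 from rfl]
                          rfl
                        · -- b ≥ 1300
                          rw [if_pos (show b ≥ (1300:Int) by omega)]
                          rw [show pvBisectB b 12 0 12 = (if b < (400:Int) then pvBisectB b 11 0 6 else pvBisectB b 11 7 12) from rfl]
                          rw [if_neg (show ¬ b < (400:Int) by omega)]
                          rw [show pvBisectB b 11 7 12 = (if b < (650:Int) then pvBisectB b 10 7 9 else pvBisectB b 10 10 12) from rfl]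
                          rw [if_neg (show ¬ b < (650:Int) by omega)]
                          rw [show pvBisectB b 10 10 12 = (if b < (1300:Int) then pvBisectB b 9 10 11 else pvBisectB b 9 12 12) from rfl]
                          rw [if_neg (show ¬ b < (1300:Int) by omega)]
                          rw [show pvBisectB b 9 12 12 = 12 from rfl]
                          rfl
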